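-- pv_equiv track=rewrite | github.com/CristSoft/indexador-de-biblia | biblia_a_sqlite.py | AsignarGrupoID
-- ===== SOURCE A (Python) =====
-- def AsignarGrupoID(libro):
--     grupos = {
--     1: ["GENESIS", "EXODO", "LEVITICO", "NUMEROS", "DEUTERONOMIO"],
--     2: ["JOSUE", "JUECES", "RUT", "SAMUEL1", "SAMUEL2", "REYES1", "REYES2", "CRONICAS1", "CRONICAS2", "ESDRAS", "NEHEMIAS", "ESTER"],
--     3: ["JOB", "SALMOS", "PROVERBIOS", "ECLESIASTES", "CANTARES"],
--     4: ["ISAIAS", "JEREMIAS", "LAMENTACIONES", "EZEQUIEL", "DANIEL"],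
--     5: ["OSEAS", "JOEL", "AMOS", "ABDIAS", "JONAS", "MIQUEAS", "NAHUM", "HABACUC", "SOFONIAS", "AGEO", "ZACARIAS", "MALAQUIAS"],
--     6: ["MATEO", "MARCOS", "LUCAS", "JUAN"],
--     7: ["HECHOS"],
--     8: ["ROMANOS", "CORINTIOS1", "CORINTIOS2", "GALATAS", "EFESIOS", "FILIPENSES", "COLOSENSES", "TESALONICENSES1", "TESALONICENSES2", "TIMOTEO1", "TIMOTEO2", "TITO", "FILEMON"],
--     9: ["HEBREOS", "SANTIAGO", "PEDRO1", "PEDRO2", "JUAN1", "JUAN2", "JUAN3", "JUDAS"],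
--     10: ["APOCALIPSIS"]
--     }
--     for grupo, libros in grupos.items():
--         if libro in libros:
--             return grupo
--     return None
-- ===== SOURCE B (Python) =====
-- # B: locate the book's position in the canonical flat list of the 66 books,
-- # then binary-search the cumulative group boundaries for that position.
-- _LIBROS = [
--     "GENESIS", "EXODO", "LEVITICO", "NUMEROS", "DEUTERONOMIO",
--     "JOSUE", "JUECES", "RUT", "SAMUEL1", "SAMUEL2", "REYES1", "REYES2",
--     "CRONICAS1", "CRONICAS2", "ESDRAS", "NEHEMIAS", "ESTER",
--     "JOB", "SALMOS", "PROVERBIOS", "ECLESIASTES", "CANTARES",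
--     "ISAIAS", "JEREMIAS", "LAMENTACIONES", "EZEQUIEL", "DANIEL",
--     "OSEAS", "JOEL", "AMOS", "ABDIAS", "JONAS", "MIQUEAS", "NAHUM",
--     "HABACUC", "SOFONIAS", "AGEO", "ZACARIAS", "MALAQUIAS",
--     "MATEO", "MARCOS", "LUCAS", "JUAN",
--     "HECHOS",
--     "ROMANOS", "CORINTIOS1", "CORINTIOS2", "GALATAS", "EFESIOS",
--     "FILIPENSES", "COLOSENSES", "TESALONICENSES1", "TESALONICENSES2",
--     "TIMOTEO1", "TIMOTEO2", "TITO", "FILEMON",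
--     "HEBREOS", "SANTIAGO", "PEDRO1", "PEDRO2", "JUAN1", "JUAN2",
--     "JUAN3", "JUDAS",
--     "APOCALIPSIS",
-- ]
-- # cumulative number of books up to and including groups 1..9
-- _CORTES = [5, 17, 22, 27, 39, 43, 44, 57, 65]
--
-- def AsignarGrupoID(libro):
--     try:
--         i = _LIBROS.index(libro)
--     except ValueError:
--         return None
--     lo, hi = 0, len(_CORTES)
--     while lo < hi:
--         mid = (lo + hi) // 2
--         if _CORTES[mid] <= i:
--             lo = mid + 1
--         else:
--             hi = mid
--     return lo + 1
-- ===== Notes on version B (the rewrite author's own statement) =====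
-- stated objective: alternative
-- what changed: Instead of scanning each group's list per call, B finds the book's position in the canonical flat 66-book list and binary-searches the cumulative group-boundary array [5,17,22,27,39,43,44,57,65] to turn that position into the group id; absence from the flat list maps to None like A's fall-through.
import Mathlib
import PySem

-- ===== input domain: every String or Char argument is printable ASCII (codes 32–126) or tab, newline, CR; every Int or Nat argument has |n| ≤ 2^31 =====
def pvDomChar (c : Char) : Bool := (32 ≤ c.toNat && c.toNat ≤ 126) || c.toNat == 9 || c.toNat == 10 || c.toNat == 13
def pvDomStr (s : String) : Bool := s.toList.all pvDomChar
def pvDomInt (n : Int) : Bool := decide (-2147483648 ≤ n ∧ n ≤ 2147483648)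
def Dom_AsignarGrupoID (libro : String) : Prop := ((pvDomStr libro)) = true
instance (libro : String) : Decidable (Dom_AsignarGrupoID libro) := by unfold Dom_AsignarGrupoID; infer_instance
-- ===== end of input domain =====

-- B replaces A's per-group membership loop by the book's position in the canonical flat
-- list of the 66 books followed by a binary search over cumulative group boundaries (alternative).

-- ===== PORT A =====
def pvGrupos : List (Int × List String) := [
  (1, ["GENESIS", "EXODO", "LEVITICO", "NUMEROS", "DEUTERONOMIO"]),
  (2, ["JOSUE", "JUECES", "RUT", "SAMUEL1", "SAMUEL2", "REYES1", "REYES2", "CRONICAS1", "CRONICAS2", "ESDRAS", "NEHEMIAS", "ESTER"]),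
  (3, ["JOB", "SALMOS", "PROVERBIOS", "ECLESIASTES", "CANTARES"]),
  (4, ["ISAIAS", "JEREMIAS", "LAMENTACIONES", "EZEQUIEL", "DANIEL"]),
  (5, ["OSEAS", "JOEL", "AMOS", "ABDIAS", "JONAS", "MIQUEAS", "NAHUM", "HABACUC", "SOFONIAS", "AGEO", "ZACARIAS", "MALAQUIAS"]),
  (6, ["MATEO", "MARCOS", "LUCAS", "JUAN"]),
  (7, ["HECHOS"]),
  (8, ["ROMANOS", "CORINTIOS1", "CORINTIOS2", "GALATAS", "EFESIOS", "FILIPENSES", "COLOSENSES", "TESALONICENSES1", "TESALONICENSES2", "TIMOTEO1", "TIMOTEO2", "TITO", "FILEMON"]),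
  (9, ["HEBREOS", "SANTIAGO", "PEDRO1", "PEDRO2", "JUAN1", "JUAN2", "JUAN3", "JUDAS"]),
  (10, ["APOCALIPSIS"])]

-- the 'for grupo, libros in grupos.items(): if libro in libros: return grupo' loop
def pvLoopA : List (Int × List String) → String → Option Int
  | [], _ => none
  | (grupo, libros) :: rest, libro =>
      if libros.contains libro then some grupo else pvLoopA rest libro

def AsignarGrupoID (libro : String) : Option Int :=
  pvLoopA pvGrupos libro

-- ===== PORT B =====
-- _LIBROS: the 66 books in canonical order (groups concatenated)
def pvLibros : List String := [
  "GENESIS", "EXODO", "LEVITICO", "NUMEROS", "DEUTERONOMIO",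
  "JOSUE", "JUECES", "RUT", "SAMUEL1", "SAMUEL2", "REYES1", "REYES2",
  "CRONICAS1", "CRONICAS2", "ESDRAS", "NEHEMIAS", "ESTER",
  "JOB", "SALMOS", "PROVERBIOS", "ECLESIASTES", "CANTARES",
  "ISAIAS", "JEREMIAS", "LAMENTACIONES", "EZEQUIEL", "DANIEL",
  "OSEAS", "JOEL", "AMOS", "ABDIAS", "JONAS", "MIQUEAS", "NAHUM",
  "HABACUC", "SOFONIAS", "AGEO", "ZACARIAS", "MALAQUIAS",
  "MATEO", "MARCOS", "LUCAS", "JUAN",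
  "HECHOS",
  "ROMANOS", "CORINTIOS1", "CORINTIOS2", "GALATAS", "EFESIOS",
  "FILIPENSES", "COLOSENSES", "TESALONICENSES1", "TESALONICENSES2",
  "TIMOTEO1", "TIMOTEO2", "TITO", "FILEMON",
  "HEBREOS", "SANTIAGO", "PEDRO1", "PEDRO2", "JUAN1", "JUAN2",
  "JUAN3", "JUDAS",
  "APOCALIPSIS"]

-- _CORTES: cumulative number of books up to and including groups 1..9
def pvCortes : List Nat := [5, 17, 22, 27, 39, 43, 44, 57, 65]

-- the 'while lo < hi' binary-search loop; fuel = hi - lo bounds the iterations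
-- (pvCortes.getD mid 0 is _CORTES[mid]; mid < len(_CORTES) always holds here, so exact)
def pvBSGo (i : Nat) : Nat → Nat → Nat → Nat
  | 0, lo, _ => lo
  | fuel + 1, lo, hi =>
      if lo < hi then
        let mid := (lo + hi) / 2
        if pvCortes.getD mid 0 ≤ i then pvBSGo i fuel (mid + 1) hi
        else pvBSGo i fuel lo mid
      else lo

def AsignarGrupoID_alt (libro : String) : Option Int :=
  match PySem.List.index? pvLibros libro with
  | none => none
  | some i => some ((pvBSGo i (pvCortes.length) 0 (pvCortes.length) : Nat) + 1)

-- ===== PRECONDITION & SPEC =====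
def Spec_AsignarGrupoID (libro : String) (out : Option Int) : Prop := out = AsignarGrupoID_alt libro
instance (libro : String) (out : Option Int) : Decidable (Spec_AsignarGrupoID libro out) := by unfold Spec_AsignarGrupoID; infer_instance

-- ===== CLAIM =====
def Claim_equal_AsignarGrupoID : Prop := ∀ (libro : String), Dom_AsignarGrupoID libro → Spec_AsignarGrupoID libro (AsignarGrupoID libro)

-- ===== LEMMAS AND PROOFS =====

theorem pv_loopA_none (gs : List (Int × List String)) (x : String)
    (h : ∀ p ∈ gs, x ∉ p.2) : pvLoopA gs x = none := by
  induction gs with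
  | nil => rfl
  | cons p rest ih =>
      obtain ⟨g, bs⟩ := p
      have hx : ¬ bs.contains x := by
        simp only [List.contains_eq_mem, decide_eq_true_eq]
        exact h (g, bs) (List.mem_cons_self)
      simp only [pvLoopA, if_neg hx]
      exact ih (fun q hq => h q (List.mem_cons_of_mem _ hq))

theorem pv_libros_flat : pvLibros = pvGrupos.flatMap (·.2) := by decide

-- ===== VERDICT =====
theorem AsignarGrupoID_spec : Claim_equal_AsignarGrupoID := by
  intro libro _
  unfold Spec_AsignarGrupoID
  by_cases hm : libro ∈ pvLibros
  · fin_cases hm <;> decide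
  · have hA : AsignarGrupoID libro = none := by
      apply pv_loopA_none
      intro p hp hx
      exact hm (pv_libros_flat ▸ List.mem_flatMap.mpr ⟨p, hp, hx⟩)
    have hB : AsignarGrupoID_alt libro = none := by
      unfold AsignarGrupoID_alt
      rw [(PySem.List.index?_eq_none_iff _ _).mpr hm]
    rw [hA, hB]
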